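-- pv_equiv track=rewrite | github.com/mcraig10/StorageCode | SetupGeneratorFleet.py | getEmsRatesOfMatchingFuelAndPlantType
-- ===== SOURCE A (Python) =====
-- def getEmsRatesOfMatchingFuelAndPlantType(baseGenFleet,plantType,fuelType,emsHeadersToAdd):
--     #Get headers
--     headersToColsMapBase = mapHeadersToCols(baseGenFleet)
--     noxCol = headersToColsMapBase[emsHeadersToAdd[0]]
--     so2Col = headersToColsMapBase[emsHeadersToAdd[1]]
--     co2Col = headersToColsMapBase[emsHeadersToAdd[2]]
--     #Get cols w/ matching fuel & plant type
--     matchingRowIdxs = getMatchingRowsFuelAndPlantType(baseGenFleet,plantType,fuelType,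
--                                                       noxCol)
--     #If can't find on fuel & plant type, try just fuel type
--     if matchingRowIdxs==[]:
--         matchingRowIdxs = getMatchingRowsFuelType(baseGenFleet,fuelType,noxCol)
--     #If still can't get emissions rate, then ues other plant & fuel type:
--     #LFG - NGCT, MSW - biomass, gas & oil O/G Steam - gas O/G Steam, Non-fossil waste -
--     if matchingRowIdxs==[] and fuelType=='Landfill Gas':
--         matchingRowIdxs = getMatchingRowsFuelAndPlantType(baseGenFleet,'Combustion Turbine',
--                                                           'Natural Gas',noxCol)
--     elif matchingRowIdxs==[] and fuelType=='MSW':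
--         matchingRowIdxs = getMatchingRowsFuelAndPlantType(baseGenFleet,'Biomass',
--                                                           'Biomass',noxCol)
--     elif matchingRowIdxs==[] and fuelType=='Natural Gas& Distillate Fuel Oil& Residual Fuel Oil':
--         matchingRowIdxs = getMatchingRowsFuelAndPlantType(baseGenFleet,'O/G Steam',
--                                                           'Natural Gas',noxCol)
--     elif matchingRowIdxs==[] and fuelType=='Non-Fossil Waste':
--         matchingRowIdxs = getMatchingRowsFuelAndPlantType(baseGenFleet,'Biomass',
--                                                           'Biomass',noxCol)
--     #Get emissions rates of matching rows
--     [nox,so2,co2] = [[],[],[]]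
--     for rowIdx in matchingRowIdxs:
--         row = baseGenFleet[rowIdx]
--         nox.append(row[noxCol])
--         so2.append(row[so2Col])
--         co2.append(row[co2Col])
--     return [nox,so2,co2]
--
-- def getMatchingRowsFuelAndPlantType(baseGenFleet,plantType,fuelType,noxCol):
--     headersToColsMapBase = mapHeadersToCols(baseGenFleet)
--     plantTypeCol = headersToColsMapBase['PlantType']
--     fuelTypeCol = headersToColsMapBase['Modeled Fuels']
--     matchingRowIdxs = []
--     for idx in range(len(baseGenFleet)):
--         row = baseGenFleet[idx]
--         if row[plantTypeCol]==plantType and row[fuelTypeCol]==fuelType: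
--             if row[noxCol] != 'NA': #make sure has data!
--                 matchingRowIdxs.append(idx)
--     return matchingRowIdxs
--
-- def getMatchingRowsFuelType(baseGenFleet,fuelType,noxCol):
--     headersToColsMapBase = mapHeadersToCols(baseGenFleet)
--     fuelTypeCol = headersToColsMapBase['Modeled Fuels']
--     matchingRowIdxs = []
--     for idx in range(len(baseGenFleet)):
--         row = baseGenFleet[idx]
--         if row[fuelTypeCol]==fuelType:
--             if row[noxCol] != 'NA': #make sure has data!
--                 matchingRowIdxs.append(idx)
--     return matchingRowIdxs
--
-- def mapHeadersToCols(fleet):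
--     headers = fleet[0]
--     headersToColsMap = dict()
--     for colNum in range(len(headers)):
--         header = headers[colNum]
--         headersToColsMap[header] = colNum
--     return headersToColsMap
-- ===== SOURCE B (Python) =====
-- def getEmsRatesOfMatchingFuelAndPlantType(baseGenFleet, plantType, fuelType, emsHeadersToAdd):
--     headers = baseGenFleet[0]
--     col = {h: i for i, h in enumerate(headers)}
--     noxCol, so2Col, co2Col = (col[h] for h in emsHeadersToAdd[:3])
--     plantCol, fuelCol = col['PlantType'], col['Modeled Fuels']
--     SUBS = {'Landfill Gas': ('Combustion Turbine', 'Natural Gas'),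
--             'MSW': ('Biomass', 'Biomass'),
--             'Natural Gas& Distillate Fuel Oil& Residual Fuel Oil': ('O/G Steam', 'Natural Gas'),
--             'Non-Fossil Waste': ('Biomass', 'Biomass')}
--     sub = SUBS.get(fuelType)
--     both, fuelOnly, subbed = [], [], []
--     for idx in range(len(baseGenFleet)):
--         row = baseGenFleet[idx]
--         if row[noxCol] == 'NA':
--             continue
--         if row[fuelCol] == fuelType:
--             fuelOnly.append(idx)
--             if row[plantCol] == plantType:
--                 both.append(idx)
--         if sub is not None and row[plantCol] == sub[0] and row[fuelCol] == sub[1]: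
--             subbed.append(idx)
--     chosen = both or fuelOnly or subbed
--     return [[baseGenFleet[i][c] for i in chosen] for c in (noxCol, so2Col, co2Col)]
-- ===== Notes on version B (the rewrite author's own statement) =====
-- stated objective: alternative
-- what changed: B replaces A's up-to-three separate scans of the fleet (plant+fuel, fuel-only, substituted plant/fuel from an if/elif chain) by one single pass that classifies every row into three index buckets using a substitution dict looked up once, then picks the first non-empty bucket in priority order.
import Mathlib
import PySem

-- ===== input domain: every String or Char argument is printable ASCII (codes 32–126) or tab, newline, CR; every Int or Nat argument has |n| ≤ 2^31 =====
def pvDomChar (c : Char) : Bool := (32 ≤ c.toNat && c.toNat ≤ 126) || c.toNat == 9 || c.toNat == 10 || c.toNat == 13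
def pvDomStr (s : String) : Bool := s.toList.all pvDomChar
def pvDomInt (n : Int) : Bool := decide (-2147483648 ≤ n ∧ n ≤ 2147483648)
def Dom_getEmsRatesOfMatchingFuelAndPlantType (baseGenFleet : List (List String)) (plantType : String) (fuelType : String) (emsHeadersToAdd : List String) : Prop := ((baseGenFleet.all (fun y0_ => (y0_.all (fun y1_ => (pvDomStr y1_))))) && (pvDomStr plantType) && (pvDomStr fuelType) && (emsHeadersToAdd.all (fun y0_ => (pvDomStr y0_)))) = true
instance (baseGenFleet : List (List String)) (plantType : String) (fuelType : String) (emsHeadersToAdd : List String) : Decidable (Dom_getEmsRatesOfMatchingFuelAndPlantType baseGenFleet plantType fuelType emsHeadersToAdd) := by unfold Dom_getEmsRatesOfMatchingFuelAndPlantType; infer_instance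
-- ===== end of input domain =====

-- B makes a single pass over the fleet collecting three index buckets (plant+fuel, fuel-only,
-- substitution pair from a dict) instead of A's up-to-three separate scans; equal return value
-- on Pre_ (objective: alternative decomposition, not claimed faster).


-- ===== PORT A =====
-- mapHeadersToCols: dict from header string to column number (later duplicates overwrite)
def pvMapHeadersToCols (fleet : List (List String)) : PySem.Dict String Int :=
  let headers := (PySem.List.pyGet? fleet 0).getD []
  (PySem.List.pyRange 0 (PySem.List.len headers) 1).foldl
    (fun d colNum => d.insert (PySem.List.pyGetD headers colNum "") colNum) PySem.Dict.empty

-- loop body of getMatchingRowsFuelAndPlantType (KeyError/IndexError cases are excluded by Pre_,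
-- so the `getD` defaults are never used on admitted inputs)
def pvStepPF (fleet : List (List String)) (plantType fuelType : String) (noxCol pc fc : Int)
    (acc : List Int) (idx : Int) : List Int :=
  let row := PySem.List.pyGetD fleet idx []
  if PySem.List.pyGetD row pc "" == plantType && PySem.List.pyGetD row fc "" == fuelType then
    if PySem.List.pyGetD row noxCol "" != "NA" then acc ++ [idx] else acc
  else acc

def pvGetMatchingRowsFuelAndPlantType (baseGenFleet : List (List String)) (plantType : String) (fuelType : String) (noxCol : Int) : List Int :=
  let m := pvMapHeadersToCols baseGenFleet
  let plantTypeCol := m.getD "PlantType" 0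
  let fuelTypeCol := m.getD "Modeled Fuels" 0
  (PySem.List.pyRange 0 (PySem.List.len baseGenFleet) 1).foldl
    (pvStepPF baseGenFleet plantType fuelType noxCol plantTypeCol fuelTypeCol) []

-- loop body of getMatchingRowsFuelType
def pvStepF (fleet : List (List String)) (fuelType : String) (noxCol fc : Int)
    (acc : List Int) (idx : Int) : List Int :=
  let row := PySem.List.pyGetD fleet idx []
  if PySem.List.pyGetD row fc "" == fuelType then
    if PySem.List.pyGetD row noxCol "" != "NA" then acc ++ [idx] else acc
  else acc

def pvGetMatchingRowsFuelType (baseGenFleet : List (List String)) (fuelType : String) (noxCol : Int) : List Int :=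
  let m := pvMapHeadersToCols baseGenFleet
  let fuelTypeCol := m.getD "Modeled Fuels" 0
  (PySem.List.pyRange 0 (PySem.List.len baseGenFleet) 1).foldl
    (pvStepF baseGenFleet fuelType noxCol fuelTypeCol) []

-- body of A's final 'for rowIdx in matchingRowIdxs' loop
def pvStepExtract (fleet : List (List String)) (noxCol so2Col co2Col : Int)
    (a : List String × List String × List String) (rowIdx : Int) :
    List String × List String × List String :=
  let row := PySem.List.pyGetD fleet rowIdx []
  (a.1 ++ [PySem.List.pyGetD row noxCol ""],
   a.2.1 ++ [PySem.List.pyGetD row so2Col ""],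
   a.2.2 ++ [PySem.List.pyGetD row co2Col ""])

def getEmsRatesOfMatchingFuelAndPlantType (baseGenFleet : List (List String)) (plantType : String) (fuelType : String) (emsHeadersToAdd : List String) : List (List String) :=
  let m := pvMapHeadersToCols baseGenFleet
  let noxCol := m.getD (PySem.List.pyGetD emsHeadersToAdd 0 "") 0
  let so2Col := m.getD (PySem.List.pyGetD emsHeadersToAdd 1 "") 0
  let co2Col := m.getD (PySem.List.pyGetD emsHeadersToAdd 2 "") 0
  let m0 := pvGetMatchingRowsFuelAndPlantType baseGenFleet plantType fuelType noxCol
  let m1 := if m0 = [] then pvGetMatchingRowsFuelType baseGenFleet fuelType noxCol else m0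
  let m2 :=
    if m1 = [] ∧ fuelType = "Landfill Gas" then
      pvGetMatchingRowsFuelAndPlantType baseGenFleet "Combustion Turbine" "Natural Gas" noxCol
    else if m1 = [] ∧ fuelType = "MSW" then
      pvGetMatchingRowsFuelAndPlantType baseGenFleet "Biomass" "Biomass" noxCol
    else if m1 = [] ∧ fuelType = "Natural Gas& Distillate Fuel Oil& Residual Fuel Oil" then
      pvGetMatchingRowsFuelAndPlantType baseGenFleet "O/G Steam" "Natural Gas" noxCol
    else if m1 = [] ∧ fuelType = "Non-Fossil Waste" then
      pvGetMatchingRowsFuelAndPlantType baseGenFleet "Biomass" "Biomass" noxCol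
    else m1
  let t := m2.foldl (pvStepExtract baseGenFleet noxCol so2Col co2Col) ([], [], [])
  [t.1, t.2.1, t.2.2]

-- ===== PORT B =====
-- the SUBS dict of Source B
def pvSubs : PySem.Dict String (String × String) :=
  PySem.Dict.ofList
    [("Landfill Gas", ("Combustion Turbine", "Natural Gas")),
     ("MSW", ("Biomass", "Biomass")),
     ("Natural Gas& Distillate Fuel Oil& Residual Fuel Oil", ("O/G Steam", "Natural Gas")),
     ("Non-Fossil Waste", ("Biomass", "Biomass"))]

-- body of Source B's single bucket-collecting loop
def pvStepB (fleet : List (List String)) (plantType fuelType : String) (noxCol pc fc : Int)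
    (sub : Option (String × String)) (b : List Int × List Int × List Int) (idx : Int) :
    List Int × List Int × List Int :=
  let row := PySem.List.pyGetD fleet idx []
  if PySem.List.pyGetD row noxCol "" == "NA" then b
  else
    let b1 :=
      if PySem.List.pyGetD row fc "" == fuelType then
        if PySem.List.pyGetD row pc "" == plantType then
          (b.1 ++ [idx], b.2.1 ++ [idx], b.2.2)
        else (b.1, b.2.1 ++ [idx], b.2.2)
      else b
    match sub with
    | some (sp, sf) =>
        if PySem.List.pyGetD row pc "" == sp && PySem.List.pyGetD row fc "" == sf then
          (b1.1, b1.2.1, b1.2.2 ++ [idx])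
        else b1
    | none => b1

def getEmsRatesOfMatchingFuelAndPlantType_alt (baseGenFleet : List (List String)) (plantType : String) (fuelType : String) (emsHeadersToAdd : List String) : List (List String) :=
  let headers := (PySem.List.pyGet? baseGenFleet 0).getD []
  let col := (PySem.List.enumerate headers 0).foldl (fun d (p : Int × String) => d.insert p.2 p.1) PySem.Dict.empty
  let e3 := PySem.List.slice emsHeadersToAdd none (some 3)
  let noxCol := col.getD (PySem.List.pyGetD e3 0 "") 0
  let so2Col := col.getD (PySem.List.pyGetD e3 1 "") 0
  let co2Col := col.getD (PySem.List.pyGetD e3 2 "") 0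
  let plantCol := col.getD "PlantType" 0
  let fuelCol := col.getD "Modeled Fuels" 0
  let sub := pvSubs.get? fuelType
  let bkt := (PySem.List.pyRange 0 (PySem.List.len baseGenFleet) 1).foldl
    (pvStepB baseGenFleet plantType fuelType noxCol plantCol fuelCol sub) ([], [], [])
  let chosen := if bkt.1 ≠ [] then bkt.1 else if bkt.2.1 ≠ [] then bkt.2.1 else bkt.2.2
  [chosen.map (fun i => PySem.List.pyGetD (PySem.List.pyGetD baseGenFleet i []) noxCol ""),
   chosen.map (fun i => PySem.List.pyGetD (PySem.List.pyGetD baseGenFleet i []) so2Col ""),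
   chosen.map (fun i => PySem.List.pyGetD (PySem.List.pyGetD baseGenFleet i []) co2Col "")]

-- ===== PRECONDITION & SPEC =====
-- Pre_ excludes inputs where Python A raises (empty fleet, fewer than 3 emission headers,
-- header names missing from the header row → KeyError) and, slightly wider, fleets containing a
-- row shorter than the header row: on such rows A raises IndexError unless short-circuiting
-- happens to skip the out-of-range column, so the whole shape is excluded.
def Pre_getEmsRatesOfMatchingFuelAndPlantType (baseGenFleet : List (List String)) (plantType : String) (fuelType : String) (emsHeadersToAdd : List String) : Prop :=
  baseGenFleet ≠ [] ∧
  3 ≤ emsHeadersToAdd.length ∧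
  "PlantType" ∈ baseGenFleet.headD [] ∧
  "Modeled Fuels" ∈ baseGenFleet.headD [] ∧
  (∀ h ∈ emsHeadersToAdd.take 3, h ∈ baseGenFleet.headD []) ∧
  (∀ row ∈ baseGenFleet, (baseGenFleet.headD []).length ≤ row.length)
instance (baseGenFleet : List (List String)) (plantType : String) (fuelType : String) (emsHeadersToAdd : List String) : Decidable (Pre_getEmsRatesOfMatchingFuelAndPlantType baseGenFleet plantType fuelType emsHeadersToAdd) := by unfold Pre_getEmsRatesOfMatchingFuelAndPlantType; infer_instance

def pvWitness_getEmsRatesOfMatchingFuelAndPlantType : List (List String) × String × String × List String :=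
  ([["PlantType", "Modeled Fuels", "n", "s", "c"], ["p", "f", "1", "2", "3"]], "p", "f", ["n", "s", "c"])

def Spec_getEmsRatesOfMatchingFuelAndPlantType (baseGenFleet : List (List String)) (plantType : String) (fuelType : String) (emsHeadersToAdd : List String) (out : List (List String)) : Prop := out = getEmsRatesOfMatchingFuelAndPlantType_alt baseGenFleet plantType fuelType emsHeadersToAdd
instance (baseGenFleet : List (List String)) (plantType : String) (fuelType : String) (emsHeadersToAdd : List String) (out : List (List String)) : Decidable (Spec_getEmsRatesOfMatchingFuelAndPlantType baseGenFleet plantType fuelType emsHeadersToAdd out) := by unfold Spec_getEmsRatesOfMatchingFuelAndPlantType; infer_instance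

-- ===== CLAIM (what is proved, stated in full; the proofs are below) =====
def Claim_equal_getEmsRatesOfMatchingFuelAndPlantType : Prop := ∀ (baseGenFleet : List (List String)) (plantType : String) (fuelType : String) (emsHeadersToAdd : List String), Dom_getEmsRatesOfMatchingFuelAndPlantType baseGenFleet plantType fuelType emsHeadersToAdd → Pre_getEmsRatesOfMatchingFuelAndPlantType baseGenFleet plantType fuelType emsHeadersToAdd → Spec_getEmsRatesOfMatchingFuelAndPlantType baseGenFleet plantType fuelType emsHeadersToAdd (getEmsRatesOfMatchingFuelAndPlantType baseGenFleet plantType fuelType emsHeadersToAdd)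

-- ===== LEMMAS AND PROOFS =====

-- the row predicates both loops are reduced to
def pvQPF (fleet : List (List String)) (pc fc nox : Int) (pt ft : String) (idx : Int) : Bool :=
  !(PySem.List.pyGetD (PySem.List.pyGetD fleet idx []) nox "" == "NA") &&
  (PySem.List.pyGetD (PySem.List.pyGetD fleet idx []) pc "" == pt &&
   PySem.List.pyGetD (PySem.List.pyGetD fleet idx []) fc "" == ft)

def pvQF (fleet : List (List String)) (fc nox : Int) (ft : String) (idx : Int) : Bool :=
  !(PySem.List.pyGetD (PySem.List.pyGetD fleet idx []) nox "" == "NA") &&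
  PySem.List.pyGetD (PySem.List.pyGetD fleet idx []) fc "" == ft

def pvQS (fleet : List (List String)) (pc fc nox : Int) (sub : Option (String × String)) (idx : Int) : Bool :=
  match sub with
  | some (sp, sf) => pvQPF fleet pc fc nox sp sf idx
  | none => false

-- canonical value both ports are reduced to
def pvCanon (fleet : List (List String)) (pt ft : String) (ems : List String) : List (List String) :=
  let m := pvMapHeadersToCols fleet
  let nox := m.getD (PySem.List.pyGetD ems 0 "") 0
  let so2 := m.getD (PySem.List.pyGetD ems 1 "") 0
  let co2 := m.getD (PySem.List.pyGetD ems 2 "") 0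
  let pc := m.getD "PlantType" 0
  let fc := m.getD "Modeled Fuels" 0
  let L := PySem.List.pyRange 0 (PySem.List.len fleet) 1
  let pf := L.filter (pvQPF fleet pc fc nox pt ft)
  let fo := L.filter (pvQF fleet fc nox ft)
  let sb := L.filter (pvQS fleet pc fc nox (pvSubs.get? ft))
  let chosen := if pf ≠ [] then pf else if fo ≠ [] then fo else sb
  [chosen.map (fun i => PySem.List.pyGetD (PySem.List.pyGetD fleet i []) nox ""),
   chosen.map (fun i => PySem.List.pyGetD (PySem.List.pyGetD fleet i []) so2 ""),
   chosen.map (fun i => PySem.List.pyGetD (PySem.List.pyGetD fleet i []) co2 "")]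

theorem pvQS_some (fleet : List (List String)) (pc fc nox : Int) (sp sf : String) :
    pvQS fleet pc fc nox (some (sp, sf)) = pvQPF fleet pc fc nox sp sf := rfl

theorem pvQS_none (fleet : List (List String)) (pc fc nox : Int) :
    pvQS fleet pc fc nox none = fun _ => false := rfl

theorem pv_foldPF (fleet : List (List String)) (pt ft : String) (nox pc fc : Int)
    (l : List Int) (acc : List Int) :
    l.foldl (pvStepPF fleet pt ft nox pc fc) acc = acc ++ l.filter (pvQPF fleet pc fc nox pt ft) := by
  induction l generalizing acc with
  | nil => simp
  | cons x xs ih =>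
    rw [List.foldl_cons, ih]
    by_cases hna : PySem.List.pyGetD (PySem.List.pyGetD fleet x []) nox "" = "NA" <;>
      by_cases hp : PySem.List.pyGetD (PySem.List.pyGetD fleet x []) pc "" = pt <;>
      by_cases hf : PySem.List.pyGetD (PySem.List.pyGetD fleet x []) fc "" = ft <;>
      simp [pvStepPF, pvQPF, hna, hp, hf]

theorem pv_foldF (fleet : List (List String)) (ft : String) (nox fc : Int)
    (l : List Int) (acc : List Int) :
    l.foldl (pvStepF fleet ft nox fc) acc = acc ++ l.filter (pvQF fleet fc nox ft) := by
  induction l generalizing acc with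
  | nil => simp
  | cons x xs ih =>
    rw [List.foldl_cons, ih]
    by_cases hna : PySem.List.pyGetD (PySem.List.pyGetD fleet x []) nox "" = "NA" <;>
      by_cases hf : PySem.List.pyGetD (PySem.List.pyGetD fleet x []) fc "" = ft <;>
      simp [pvStepF, pvQF, hna, hf]

theorem pv_foldB (fleet : List (List String)) (pt ft : String) (nox pc fc : Int)
    (sub : Option (String × String)) (l : List Int) (b : List Int × List Int × List Int) :
    l.foldl (pvStepB fleet pt ft nox pc fc sub) b
    = (b.1 ++ l.filter (pvQPF fleet pc fc nox pt ft),
       b.2.1 ++ l.filter (pvQF fleet fc nox ft),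
       b.2.2 ++ l.filter (pvQS fleet pc fc nox sub)) := by
  induction l generalizing b with
  | nil => simp
  | cons x xs ih =>
    rw [List.foldl_cons, ih]
    clear ih
    obtain ⟨b1, b2, b3⟩ := b
    rcases sub with _ | ⟨sp, sf⟩ <;>
      by_cases hna : PySem.List.pyGetD (PySem.List.pyGetD fleet x []) nox "" = "NA" <;>
      by_cases hp : PySem.List.pyGetD (PySem.List.pyGetD fleet x []) pc "" = pt <;>
      by_cases hf : PySem.List.pyGetD (PySem.List.pyGetD fleet x []) fc "" = ft <;>
      first
      | (by_cases hsp : PySem.List.pyGetD (PySem.List.pyGetD fleet x []) pc "" = sp <;>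
         by_cases hsf : PySem.List.pyGetD (PySem.List.pyGetD fleet x []) fc "" = sf <;>
         simp only [pvStepB, pvQPF, pvQF, pvQS, List.filter_cons] <;>
         simp [hna, hp, hf, hsp, hsf] <;>
         split_ifs <;> simp_all)
      | simp [pvStepB, pvQPF, pvQF, pvQS, hna, hp, hf]

theorem pv_foldExtract (fleet : List (List String)) (nox so2 co2 : Int)
    (l : List Int) (t : List String × List String × List String) :
    l.foldl (pvStepExtract fleet nox so2 co2) t
    = (t.1 ++ l.map (fun i => PySem.List.pyGetD (PySem.List.pyGetD fleet i []) nox ""),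
       t.2.1 ++ l.map (fun i => PySem.List.pyGetD (PySem.List.pyGetD fleet i []) so2 ""),
       t.2.2 ++ l.map (fun i => PySem.List.pyGetD (PySem.List.pyGetD fleet i []) co2 "")) := by
  induction l generalizing t with
  | nil => simp
  | cons x xs ih =>
    rw [List.foldl_cons, ih]
    obtain ⟨t1, t2, t3⟩ := t
    simp [pvStepExtract]

theorem pv_scanPF_eq (fleet : List (List String)) (pt ft : String) (nox : Int) :
    pvGetMatchingRowsFuelAndPlantType fleet pt ft nox =
      (PySem.List.pyRange 0 (PySem.List.len fleet) 1).filter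
        (pvQPF fleet ((pvMapHeadersToCols fleet).getD "PlantType" 0)
          ((pvMapHeadersToCols fleet).getD "Modeled Fuels" 0) nox pt ft) := by
  unfold pvGetMatchingRowsFuelAndPlantType
  simpa using pv_foldPF fleet pt ft nox _ _ _ []

theorem pv_scanF_eq (fleet : List (List String)) (ft : String) (nox : Int) :
    pvGetMatchingRowsFuelType fleet ft nox =
      (PySem.List.pyRange 0 (PySem.List.len fleet) 1).filter
        (pvQF fleet ((pvMapHeadersToCols fleet).getD "Modeled Fuels" 0) nox ft) := by
  unfold pvGetMatchingRowsFuelType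
  simpa using pv_foldF fleet ft nox _ _ []

-- B's enumerate-built column dict is A's range-built one
theorem pv_col_eq (fleet : List (List String)) :
    (PySem.List.enumerate ((PySem.List.pyGet? fleet 0).getD []) 0).foldl
      (fun d (p : Int × String) => d.insert p.2 p.1) PySem.Dict.empty = pvMapHeadersToCols fleet := by
  unfold pvMapHeadersToCols
  rw [PySem.List.enumerate_eq_map_pyRange ((PySem.List.pyGet? fleet 0).getD []) "", List.foldl_map]

-- xs[:3][k] = xs[k] for k < 3 (with default)
theorem pv_take3 (xs : List String) (k : Nat) (hk : k < 3) :
    PySem.List.pyGetD (PySem.List.slice xs none (some 3)) (k : Int) "" = PySem.List.pyGetD xs (k : Int) "" := by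
  rw [PySem.List.slice_to xs (by norm_num)]
  simp only [PySem.List.pyGetD_natCast]
  simp [List.getD, hk]

theorem pv_take3_0 (xs : List String) :
    PySem.List.pyGetD (PySem.List.slice xs none (some 3)) 0 "" = PySem.List.pyGetD xs 0 "" :=
  pv_take3 xs 0 (by norm_num)

theorem pv_take3_1 (xs : List String) :
    PySem.List.pyGetD (PySem.List.slice xs none (some 3)) 1 "" = PySem.List.pyGetD xs 1 "" :=
  pv_take3 xs 1 (by norm_num)

theorem pv_take3_2 (xs : List String) :
    PySem.List.pyGetD (PySem.List.slice xs none (some 3)) 2 "" = PySem.List.pyGetD xs 2 "" :=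
  pv_take3 xs 2 (by norm_num)

theorem pv_subs_none (ft : String) (h1 : ft ≠ "Landfill Gas") (h2 : ft ≠ "MSW")
    (h3 : ft ≠ "Natural Gas& Distillate Fuel Oil& Residual Fuel Oil") (h4 : ft ≠ "Non-Fossil Waste") :
    pvSubs.get? ft = none := by
  rw [PySem.Dict.get?_eq_none_iff_not_mem_keys]
  have hk : pvSubs.keys = ["Landfill Gas", "MSW", "Natural Gas& Distillate Fuel Oil& Residual Fuel Oil", "Non-Fossil Waste"] := by decide
  rw [hk]
  simp [h1, h2, h3, h4]

-- A equals the canonical form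
theorem pv_a_eq (fleet : List (List String)) (pt ft : String) (ems : List String) :
    getEmsRatesOfMatchingFuelAndPlantType fleet pt ft ems = pvCanon fleet pt ft ems := by
  unfold getEmsRatesOfMatchingFuelAndPlantType pvCanon
  dsimp only
  simp only [pv_scanPF_eq, pv_scanF_eq, pv_foldExtract]
  simp only [List.nil_append]
  set pcD := (pvMapHeadersToCols fleet).getD "PlantType" 0 with hpc
  set fcD := (pvMapHeadersToCols fleet).getD "Modeled Fuels" 0 with hfc
  set noxD := (pvMapHeadersToCols fleet).getD (PySem.List.pyGetD ems 0 "") 0 with hnox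
  set L := PySem.List.pyRange 0 (PySem.List.len fleet) 1 with hL
  set PF := L.filter (pvQPF fleet pcD fcD noxD pt ft) with hPF
  set FO := L.filter (pvQF fleet fcD noxD ft) with hFO
  by_cases h1 : PF = []
  · rw [if_pos h1, if_neg (not_not_intro h1)]
    by_cases h2 : FO = []
    · rw [if_neg (not_not_intro h2)]
      by_cases hft1 : ft = "Landfill Gas"
      · subst hft1
        rw [if_pos ⟨h2, rfl⟩,
          show pvSubs.get? "Landfill Gas" = some ("Combustion Turbine", "Natural Gas") from by decide]
        rw [pvQS_some]
      · rw [if_neg (fun hh => hft1 hh.2)]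
        by_cases hft2 : ft = "MSW"
        · subst hft2
          rw [if_pos ⟨h2, rfl⟩,
            show pvSubs.get? "MSW" = some ("Biomass", "Biomass") from by decide]
          rw [pvQS_some]
        · rw [if_neg (fun hh => hft2 hh.2)]
          by_cases hft3 : ft = "Natural Gas& Distillate Fuel Oil& Residual Fuel Oil"
          · subst hft3
            rw [if_pos ⟨h2, rfl⟩,
              show pvSubs.get? "Natural Gas& Distillate Fuel Oil& Residual Fuel Oil" = some ("O/G Steam", "Natural Gas") from by decide]
            rw [pvQS_some]
          · rw [if_neg (fun hh => hft3 hh.2)]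
            by_cases hft4 : ft = "Non-Fossil Waste"
            · subst hft4
              rw [if_pos ⟨h2, rfl⟩,
                show pvSubs.get? "Non-Fossil Waste" = some ("Biomass", "Biomass") from by decide]
              rw [pvQS_some]
            · rw [if_neg (fun hh => hft4 hh.2),
                pv_subs_none ft hft1 hft2 hft3 hft4, pvQS_none, h2]
              simp
    · rw [if_neg (fun hh => h2 hh.1), if_neg (fun hh => h2 hh.1), if_neg (fun hh => h2 hh.1), if_neg (fun hh => h2 hh.1), if_pos h2]
  · rw [if_neg h1, if_pos h1]
    rw [if_neg (fun hh => h1 hh.1), if_neg (fun hh => h1 hh.1), if_neg (fun hh => h1 hh.1), if_neg (fun hh => h1 hh.1)]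

-- B equals the canonical form
theorem pv_b_eq (fleet : List (List String)) (pt ft : String) (ems : List String) :
    getEmsRatesOfMatchingFuelAndPlantType_alt fleet pt ft ems = pvCanon fleet pt ft ems := by
  unfold getEmsRatesOfMatchingFuelAndPlantType_alt pvCanon
  dsimp only
  simp only [pv_col_eq, pv_take3_0, pv_take3_1, pv_take3_2, pv_foldB]
  simp only [List.nil_append]

theorem pv_witness_ok :
    Dom_getEmsRatesOfMatchingFuelAndPlantType (pvWitness_getEmsRatesOfMatchingFuelAndPlantType.1) (pvWitness_getEmsRatesOfMatchingFuelAndPlantType.2.1) (pvWitness_getEmsRatesOfMatchingFuelAndPlantType.2.2.1) (pvWitness_getEmsRatesOfMatchingFuelAndPlantType.2.2.2) ∧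
    Pre_getEmsRatesOfMatchingFuelAndPlantType (pvWitness_getEmsRatesOfMatchingFuelAndPlantType.1) (pvWitness_getEmsRatesOfMatchingFuelAndPlantType.2.1) (pvWitness_getEmsRatesOfMatchingFuelAndPlantType.2.2.1) (pvWitness_getEmsRatesOfMatchingFuelAndPlantType.2.2.2) := by
  decide

-- ===== VERDICT (by name: the statement is the Claim_ definition above) =====
theorem getEmsRatesOfMatchingFuelAndPlantType_spec : Claim_equal_getEmsRatesOfMatchingFuelAndPlantType := by
  intro fleet pt ft ems _ _
  unfold Spec_getEmsRatesOfMatchingFuelAndPlantType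
  rw [pv_a_eq, pv_b_eq]
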